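-- pv_equiv track=rewrite | github.com/cerber-os/lo3-chmura | chmura/timetable.py | getLessonsEnding
-- ===== SOURCE A (Python) =====
-- def getLessonsEnding(timetable):
--     biggest_num = 6
--     for day in timetable:
--         if day == 'timetable_settings':
--             continue
--         iterator = len(timetable[day]) - 1
--         while iterator >= 0:
--             if timetable[day][iterator]:
--                 break
--             iterator -= 1
--         if biggest_num < iterator:
--             biggest_num = iterator
--     return biggest_num
-- ===== SOURCE B (Python) =====
-- def getLessonsEnding(timetable):
--     return max([6] + [i for day in timetable if day != 'timetable_settings'
--                         for i, lesson in enumerate(timetable[day]) if lesson])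
-- ===== Notes on version B (the rewrite author's own statement) =====
-- stated objective: simpler
-- what changed: Replaced the per-day backward while-loop with break and a running-best accumulator by one flat comprehension of all truthy lesson indices (settings key skipped) and a single max with the 6 floor.
import Mathlib
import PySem

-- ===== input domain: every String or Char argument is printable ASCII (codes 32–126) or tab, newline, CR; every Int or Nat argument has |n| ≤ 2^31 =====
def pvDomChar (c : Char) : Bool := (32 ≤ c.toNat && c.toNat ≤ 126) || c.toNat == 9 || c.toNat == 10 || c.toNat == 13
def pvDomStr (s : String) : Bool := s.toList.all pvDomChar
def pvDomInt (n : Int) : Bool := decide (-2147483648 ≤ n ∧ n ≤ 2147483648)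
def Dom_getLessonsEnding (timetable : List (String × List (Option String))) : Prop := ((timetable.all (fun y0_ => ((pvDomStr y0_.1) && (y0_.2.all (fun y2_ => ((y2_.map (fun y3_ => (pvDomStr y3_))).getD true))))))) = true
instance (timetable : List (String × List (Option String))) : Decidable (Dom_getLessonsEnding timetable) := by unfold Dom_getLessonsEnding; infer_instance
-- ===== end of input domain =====

-- B changes only the return-value computation (one flat max over truthy indices instead of
-- per-day backward scans with break); the proofs are about the return value.

-- Python truthiness of an Optional[str] lesson entry: non-None and non-empty.
def pvTruthy : Option String → Bool
  | none => false
  | some s => !(s == "")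

-- `timetable[day]`: first-match dict lookup in the association list (both Pythons do this).
def pvLookup (t : List (String × List (Option String))) (day : String) : List (Option String) :=
  ((t.find? (fun p => p.1 == day)).map (·.2)).getD []

-- ===== PORT A =====
-- the backward while loop: argument k is iterator+1; k = 0 means iterator reached -1
def pvLastIdx (xs : List (Option String)) : Nat → Int
  | 0 => -1
  | k+1 => if pvTruthy (xs.getD k none) then ((k : Nat) : Int) else pvLastIdx xs k

def getLessonsEnding (timetable : List (String × List (Option String))) : Int :=
  timetable.foldl
    (fun biggest_num p =>
      if p.1 == "timetable_settings" then biggest_num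
      else
        let xs := pvLookup timetable p.1
        let it := pvLastIdx xs xs.length
        if biggest_num < it then it else biggest_num)
    6

-- ===== PORT B =====
def getLessonsEnding_alt (timetable : List (String × List (Option String))) : Int :=
  (timetable.flatMap
    (fun p =>
      if p.1 == "timetable_settings" then []
      else (PySem.List.enumerate (pvLookup timetable p.1)).filterMap
        (fun q => if pvTruthy q.2 then some q.1 else none))).foldl max 6

-- ===== PRECONDITION & SPEC =====
def Spec_getLessonsEnding (timetable : List (String × List (Option String))) (out : Int) : Prop := out = getLessonsEnding_alt timetable
instance (timetable : List (String × List (Option String))) (out : Int) : Decidable (Spec_getLessonsEnding timetable out) := by unfold Spec_getLessonsEnding; infer_instance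

-- ===== CLAIM (what is proved, stated in full; the proofs are below) =====
def Claim_equal_getLessonsEnding : Prop := ∀ (timetable : List (String × List (Option String))), Dom_getLessonsEnding timetable → Spec_getLessonsEnding timetable (getLessonsEnding timetable)

-- ===== LEMMAS AND PROOFS =====

def pvIdxs (xs : List (Option String)) : List Int :=
  (PySem.List.enumerate xs).filterMap (fun q => if pvTruthy q.2 then some q.1 else none)

theorem foldl_max_max (l : List Int) (a b : Int) :
    l.foldl max (max a b) = max a (l.foldl max b) := by
  induction l generalizing b with
  | nil => rfl
  | cons c t ih => simp only [List.foldl_cons, max_assoc, ih]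

theorem foldl_max_lt (l : List Int) (a k : Int) (ha : a < k) (h : ∀ y ∈ l, y < k) :
    l.foldl max a < k := by
  induction l generalizing a with
  | nil => exact ha
  | cons c t ih =>
    simp only [List.foldl_cons]
    exact ih _ (max_lt ha (h c (List.mem_cons_self))) (fun y hy => h y (List.mem_cons_of_mem _ hy))

theorem mem_pvIdxs_lt (xs : List (Option String)) (y : Int) (hy : y ∈ pvIdxs xs) :
    y < (xs.length : Int) := by
  unfold pvIdxs at hy
  obtain ⟨q, hq, hfy⟩ := List.mem_filterMap.mp hy
  rw [PySem.List.mem_enumerate_iff] at hq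
  obtain ⟨k, hk, rfl⟩ := hq
  split at hfy
  · cases hfy; simpa using hk
  · cases hfy

theorem pvIdxs_take (xs : List (Option String)) (k : Nat) (hk : k ≤ xs.length) :
    pvLastIdx xs k = (pvIdxs (xs.take k)).foldl max (-1) := by
  induction k with
  | zero => simp [pvLastIdx, pvIdxs, PySem.List.enumerate_nil]
  | succ k ih =>
    have hklt : k < xs.length := hk
    have htake : xs.take (k+1) = xs.take k ++ [xs[k]] := List.take_succ_eq_append_getElem hklt
    have hlen : (xs.take k).length = k := List.length_take_of_le (Nat.le_of_lt hklt)
    have hget : xs.getD k none = xs[k] := by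
      simp [List.getD, List.getElem?_eq_getElem hklt]
    have hidxs : pvIdxs (xs.take (k+1)) =
        pvIdxs (xs.take k) ++ (if pvTruthy xs[k] then [((k : Nat) : Int)] else []) := by
      unfold pvIdxs
      rw [htake, PySem.List.enumerate_append, List.filterMap_append, hlen]
      congr 1
      rw [PySem.List.enumerate_cons, PySem.List.enumerate_nil]
      by_cases ht : pvTruthy xs[k] = true <;> simp [ht]
    rw [hidxs, List.foldl_append]
    have ihk := ih (Nat.le_of_lt hklt)
    have hub : (pvIdxs (xs.take k)).foldl max (-1) < ((k : Nat) : Int) := by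
      apply foldl_max_lt
      · omega
      · intro y hy
        have := mem_pvIdxs_lt _ y hy
        rw [hlen] at this
        exact this
    simp only [pvLastIdx, hget]
    split
    · simp only [List.foldl_cons, List.foldl_nil]
      omega
    · simp [ihk]

-- per-day step: updating the running best equals folding max over that day's truthy indices
theorem day_step (xs : List (Option String)) (b : Int) (hb : -1 ≤ b) :
    (if b < pvLastIdx xs xs.length then pvLastIdx xs xs.length else b)
      = (pvIdxs xs).foldl max b := by
  have h := pvIdxs_take xs xs.length (Nat.le_refl _)
  rw [List.take_length] at h
  have hb' : max b (-1) = b := by omega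
  have := foldl_max_max (pvIdxs xs) b (-1)
  rw [hb'] at this
  rw [this, ← h]
  rcases lt_or_ge b (pvLastIdx xs xs.length) with h1 | h1 <;> simp [h1] <;> omega

theorem pvLastIdx_ge_neg_one (xs : List (Option String)) (k : Nat) :
    -1 ≤ pvLastIdx xs k := by
  induction k with
  | zero => simp [pvLastIdx]
  | succ k ih => simp only [pvLastIdx]; split; · omega
                 · exact ih

theorem main_fold (t l : List (String × List (Option String))) (b : Int) (hb : -1 ≤ b) :
    l.foldl
      (fun biggest_num p =>
        if p.1 == "timetable_settings" then biggest_num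
        else
          let xs := pvLookup t p.1
          let it := pvLastIdx xs xs.length
          if biggest_num < it then it else biggest_num)
      b
    = (l.flatMap
        (fun p =>
          if p.1 == "timetable_settings" then []
          else pvIdxs (pvLookup t p.1))).foldl max b := by
  induction l generalizing b with
  | nil => rfl
  | cons p rest ih =>
    simp only [List.foldl_cons, List.flatMap_cons, List.foldl_append]
    by_cases hp : p.1 == "timetable_settings"
    · simp only [hp, if_true]
      exact ih b hb
    · simp only [hp, Bool.false_eq_true, if_false]
      rw [← day_step _ b hb]
      apply ih
      split <;> [skip; exact hb]
      have := pvLastIdx_ge_neg_one (pvLookup t p.1) (pvLookup t p.1).length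
      omega


-- ===== VERDICT (by name: the statement is the Claim_ definition above) =====
theorem getLessonsEnding_spec : Claim_equal_getLessonsEnding := by
  intro t _
  unfold Spec_getLessonsEnding getLessonsEnding getLessonsEnding_alt
  rw [main_fold t t 6 (by norm_num)]
  rfl
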